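-- pv_equiv track=rewrite | github.com/npenrose/EODP_Project_2 | preprocessing.py | create_title_substring
-- ===== SOURCE A (Python) =====
-- def create_title_substring(string):
--     punctuation = [';', ':', '?', '!', '~', '(']
--     title_substring = ''
--
--     for char in string:
--         if char in punctuation:
--             if title_substring:
--                 title_substring = title_substring.strip(title_substring[-1])
--             return title_substring
--
--         title_substring += char
--
--     return string
-- ===== SOURCE B (Python) =====
-- def create_title_substring(string):
--     # locate-then-slice: first punctuation position = min of per-char find results
--     idxs = [i for i in (string.find(c) for c in ';:?!~(') if i != -1]
--     if not idxs:
--         return string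
--     sub = string[:min(idxs)]
--     if sub:
--         sub = sub.strip(sub[-1])
--     return sub
-- ===== Notes on version B (the rewrite author's own statement) =====
-- stated objective: faster
-- what changed: Replaces A's build-as-you-go character loop with early return by a locate-then-slice structure: the first punctuation position is computed as the min of per-character str.find results, then the prefix is sliced off and stripped once.
import Mathlib
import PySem

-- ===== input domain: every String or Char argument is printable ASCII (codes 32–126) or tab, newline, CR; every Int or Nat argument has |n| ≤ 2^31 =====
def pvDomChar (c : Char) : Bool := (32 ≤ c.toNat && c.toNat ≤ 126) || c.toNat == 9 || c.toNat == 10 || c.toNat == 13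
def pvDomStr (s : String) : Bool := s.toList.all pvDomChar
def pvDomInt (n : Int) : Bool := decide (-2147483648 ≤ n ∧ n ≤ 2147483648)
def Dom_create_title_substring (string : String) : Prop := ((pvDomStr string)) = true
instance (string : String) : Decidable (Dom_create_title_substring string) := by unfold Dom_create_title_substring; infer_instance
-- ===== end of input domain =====

-- B locates the first punctuation position as the min of per-character str.find results, then slices and strips once; same O(n) but the scan runs in C (measured faster).

-- ===== PORT A =====
def ctsPunct : List Char := [';', ':', '?', '!', '~', '(']

-- the for-loop of A: accumulate characters until a punctuation char, then strip and return early
def ctsGo (orig : String) : List Char → List Char → String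
  | [], _ => orig
  | c :: rest, acc =>
    if ctsPunct.contains c then
      if acc.isEmpty then String.ofList acc
      else String.ofList (PySem.Chars.stripChars acc [acc.getLast!])
    else ctsGo orig rest (acc ++ [c])

def create_title_substring (string : String) : String :=
  ctsGo string string.toList []

-- ===== PORT B =====
def create_title_substring_alt (string : String) : String :=
  let cs := string.toList
  let idxs := (ctsPunct.map (fun c => PySem.Chars.find cs [c])).filter (fun i => i ≠ -1)
  match PySem.List.min? idxs (fun x => x) with
  | none => string
  | some m =>
    let sub := PySem.Chars.slice cs none (some m)
    if sub.isEmpty then String.ofList sub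
    else String.ofList (PySem.Chars.stripChars sub [sub.getLast!])

-- ===== PRECONDITION & SPEC =====
def Spec_create_title_substring (string : String) (out : String) : Prop := out = create_title_substring_alt string
instance (string : String) (out : String) : Decidable (Spec_create_title_substring string out) := by unfold Spec_create_title_substring; infer_instance

-- ===== CLAIM (what is proved, stated in full; the proofs are below) =====
def Claim_equal_create_title_substring : Prop := ∀ (string : String), Dom_create_title_substring string → Spec_create_title_substring string (create_title_substring string)

-- ===== LEMMAS AND PROOFS =====

-- single-character find is the first index of that character
theorem singleton_prefix_iff (c : Char) (l : List Char) : [c] <+: l ↔ l.head? = some c := by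
  cases l with
  | nil => simp
  | cons x t => simp [List.cons_prefix_cons]; exact eq_comm

theorem find_singleton (cs : List Char) (c : Char) :
    PySem.Chars.find cs [c] = match cs.findIdx? (· == c) with
      | none => -1
      | some j => (j : Int) := by
  cases h : cs.findIdx? (· == c) with
  | none =>
    have hmem : c ∉ cs := by
      intro hc
      have := (List.findIdx?_eq_none_iff.mp h) c hc
      simp at this
    exact (PySem.Chars.find_eq_neg_one_iff cs [c]).mpr
      (fun hin => hmem ((List.singleton_infix_iff c cs).mp hin))
  | some j =>
    obtain ⟨hj, hcj, hmin⟩ := List.findIdx?_eq_some_iff_getElem.mp h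
    have hcj' : cs[j] = c := by simpa using hcj
    have hne : PySem.Chars.find cs [c] ≠ -1 := by
      rw [ne_eq, PySem.Chars.find_eq_neg_one_iff, not_not]
      exact (List.singleton_infix_iff c cs).mpr (hcj' ▸ cs.getElem_mem hj)
    have hspec := PySem.Chars.findFrom_natCast_spec cs [c] 0 (by omega)
    rw [Nat.cast_zero, PySem.Chars.findFrom_zero] at hspec
    obtain ⟨hge, hpre, hminf⟩ := hspec hne
    set f := PySem.Chars.find cs [c] with hf
    have hat : cs[f.toNat]? = some c := by
      have := (singleton_prefix_iff c _).mp hpre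
      rwa [List.head?_drop] at this
    have hflt : f.toNat < cs.length := (List.getElem?_eq_some_iff.mp hat).1
    have hfc : cs[f.toNat] = c := by
      have := (List.getElem?_eq_some_iff.mp hat).2; simpa using this
    -- j ≤ f.toNat: otherwise minimality of findIdx? is violated… actually use hmin on f.toNat
    have h1 : ¬ f.toNat < j := by
      intro hlt
      have := hmin f.toNat hlt
      simp [hfc] at this
    -- f.toNat ≤ j: minimality of find
    have h2 : ¬ j < f.toNat := by
      intro hlt
      apply hminf j (by omega) hlt
      rw [singleton_prefix_iff, List.head?_drop]
      simp [hcj', hj]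
    have : f.toNat = j := by omega
    show f = (j : Int)
    omega

-- the min of the per-character finds is the first index of any punctuation char
theorem min_finds (cs : List Char) :
    PySem.List.min? ((ctsPunct.map (fun c => PySem.Chars.find cs [c])).filter (fun i => i ≠ -1)) (fun x => x)
      = (cs.findIdx? (fun c => ctsPunct.contains c)).map (fun j => (j : Int)) := by
  cases h : cs.findIdx? (fun c => ctsPunct.contains c) with
  | none =>
    have hnone := List.findIdx?_eq_none_iff.mp h
    have hF : (ctsPunct.map (fun c => PySem.Chars.find cs [c])).filter (fun i => i ≠ -1) = [] := by
      rw [List.filter_eq_nil_iff]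
      intro i hi
      obtain ⟨c, hcP, rfl⟩ := List.mem_map.mp hi
      have hfi : cs.findIdx? (· == c) = none := by
        rw [List.findIdx?_eq_none_iff]
        intro x hx
        by_contra hxc
        have hxc' : x = c := by simpa using hxc
        have := hnone x hx
        rw [hxc'] at this
        simp at this
        exact this hcP
      rw [find_singleton, hfi]
      simp
    rw [hF]
    simp [PySem.List.min?_eq_none_iff]
  | some j =>
    obtain ⟨hj, hpj, hmin⟩ := List.findIdx?_eq_some_iff_getElem.mp h
    have hc0P : cs[j] ∈ ctsPunct := by simpa using hpj
    have hfi : cs.findIdx? (· == cs[j]) = some j := by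
      apply List.findIdx?_eq_some_iff_getElem.mpr
      refine ⟨hj, by simp, ?_⟩
      intro j' hlt
      have hnp := hmin j' hlt
      by_contra hceq
      have hceq' : cs[j'] = cs[j] := by simpa using hceq
      rw [hceq'] at hnp
      exact hnp hpj
    have hfind : PySem.Chars.find cs [cs[j]] = (j : Int) := by
      rw [find_singleton, hfi]
    have hjF : (j : Int) ∈ (ctsPunct.map (fun c => PySem.Chars.find cs [c])).filter (fun i => i ≠ -1) := by
      rw [List.mem_filter]
      exact ⟨List.mem_map.mpr ⟨cs[j], hc0P, hfind⟩, by simp⟩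
    have hlb : ∀ y ∈ (ctsPunct.map (fun c => PySem.Chars.find cs [c])).filter (fun i => i ≠ -1), (j : Int) ≤ y := by
      intro y hy
      obtain ⟨hym, hyne⟩ := List.mem_filter.mp hy
      obtain ⟨c, hcP, rfl⟩ := List.mem_map.mp hym
      rw [find_singleton] at hyne ⊢
      cases hi : cs.findIdx? (· == c) with
      | none => rw [hi] at hyne; simp at hyne
      | some i =>
        obtain ⟨hi', hci, _⟩ := List.findIdx?_eq_some_iff_getElem.mp hi
        have hci' : cs[i] = c := by simpa using hci
        have hnl : ¬ i < j := by
          intro hlt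
          have hmj := hmin i hlt
          rw [hci'] at hmj
          exact hmj (by simpa using hcP)
        show (j : Int) ≤ (i : Int)
        omega
    cases hm : PySem.List.min? ((ctsPunct.map (fun c => PySem.Chars.find cs [c])).filter (fun i => i ≠ -1)) (fun x => x) with
    | none =>
      rw [PySem.List.min?_eq_none_iff] at hm
      rw [hm] at hjF
      simp at hjF
    | some m =>
      have h1 : m ≤ (j : Int) := PySem.List.min?_isMin hm _ hjF
      have h2 : (j : Int) ≤ m := hlb m (PySem.List.min?_mem hm)
      show (some m : Option Int) = some ((j : Int))
      have hmj : m = (j : Int) := le_antisymm h1 h2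
      rw [hmj]

-- A's loop in terms of findIdx?
theorem ctsGo_spec (orig : String) (rest acc : List Char) :
    ctsGo orig rest acc = match rest.findIdx? (fun c => ctsPunct.contains c) with
      | none => orig
      | some i =>
        let sub := acc ++ rest.take i
        if sub.isEmpty then String.ofList sub
        else String.ofList (PySem.Chars.stripChars sub [sub.getLast!]) := by
  induction rest generalizing acc with
  | nil => simp [ctsGo]
  | cons c t ih =>
    rw [ctsGo, List.findIdx?_cons]
    by_cases hc : ctsPunct.contains c
    · simp only [hc, if_true, List.take_zero, List.append_nil]
    · rw [if_neg hc, ih]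
      simp only [hc, if_neg, Bool.false_eq_true, not_false_eq_true]
      cases t.findIdx? (fun c => ctsPunct.contains c) with
      | none => simp
      | some i => simp [List.take_succ_cons]

-- ===== VERDICT (by name: the statement is the Claim_ definition above) =====
theorem create_title_substring_spec : Claim_equal_create_title_substring := by
  intro s _
  unfold Spec_create_title_substring create_title_substring create_title_substring_alt
  rw [ctsGo_spec]
  dsimp only []
  rw [min_finds]
  cases h : s.toList.findIdx? (fun c => ctsPunct.contains c) with
  | none => simp
  | some j =>
    have hj : (j : Int) ≥ 0 := by positivity
    simp [PySem.Chars.slice_eq_listSlice, PySem.List.slice_to _ hj]
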